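-- pv_equiv track=rewrite | github.com/Jjenny-K/coding-test-practice | programmers/p_lv_01/python/숫자 짝꿍.py | solution_002
-- ===== SOURCE A (Python) =====
-- def solution_002(X, Y):
--     answer = ''
--
--     for i in range(9, -1, -1):
--         answer += (str(i) * min(X.count(str(i)), Y.count(str(i))))
--
--     if answer == '':
--         return '-1'
--     elif len(answer) == answer.count('0'):
--         return '0'
--     else:
--         return answer
-- ===== SOURCE B (Python) =====
-- def solution_002(X, Y):
--     # multiset intersection by sorting: collect the digits of each string,
--     # sort them descending, then a two-pointer merge keeps exactly the
--     # common multiset, already in the required order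
--     xs = sorted((c for c in X if c.isdigit()), reverse=True)
--     ys = sorted((c for c in Y if c.isdigit()), reverse=True)
--     out = []
--     i = j = 0
--     while i < len(xs) and j < len(ys):
--         if xs[i] == ys[j]:
--             out.append(xs[i])
--             i += 1
--             j += 1
--         elif xs[i] > ys[j]:
--             i += 1
--         else:
--             j += 1
--     if not out:
--         return '-1'
--     if out[0] == '0':
--         return '0'
--     return ''.join(out)
-- ===== Notes on version B (the rewrite author's own statement) =====
-- stated objective: alternative
-- what changed: A scans each string ten times with str.count and builds the answer digit by digit; B instead sorts the digits of each string descending and computes the common multiset with a two-pointer sorted-merge intersection, which emits the answer directly in order.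
import Mathlib
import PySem

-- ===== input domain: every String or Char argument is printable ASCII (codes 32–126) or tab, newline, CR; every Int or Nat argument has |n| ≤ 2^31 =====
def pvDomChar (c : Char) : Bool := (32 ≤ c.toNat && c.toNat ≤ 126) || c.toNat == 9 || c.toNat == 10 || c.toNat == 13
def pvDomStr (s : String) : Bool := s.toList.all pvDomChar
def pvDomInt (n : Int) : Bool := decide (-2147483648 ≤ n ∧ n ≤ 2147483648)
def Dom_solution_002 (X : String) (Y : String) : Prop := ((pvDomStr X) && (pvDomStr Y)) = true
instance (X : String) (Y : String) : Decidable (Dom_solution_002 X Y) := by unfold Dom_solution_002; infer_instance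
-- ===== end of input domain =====

-- B replaces A's ten str.count scans per string by sorting each string's digits descending and
-- intersecting the two sorted digit multisets with a two-pointer merge (alternative algorithm).

-- ===== PORT A =====
-- literal port of A; the answer string is built as a List Char (String concatenation is opaque
-- to the kernel), 'str(i) * n' is (List.replicate n (toChars i)).flatten — exact on these inputs
def solution_002 (X : String) (Y : String) : String :=
  let answer : List Char :=
    (PySem.List.pyRange 9 (-1) (-1)).foldl (fun answer i =>
      answer ++ (List.replicate
        (min (PySem.Chars.count X.toList (PySem.Int.toChars i))
             (PySem.Chars.count Y.toList (PySem.Int.toChars i)))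
        (PySem.Int.toChars i)).flatten) []
  if answer = [] then "-1"
  else if answer.length = PySem.Chars.count answer ['0'] then "0"
  else String.ofList answer

-- ===== PORT B =====
-- the two-pointer while loop over the two sorted lists: advancing a pointer is dropping a head
def pvMerge : List Char → List Char → List Char
  | [], _ => []
  | _ :: _, [] => []
  | x :: xs, y :: ys =>
    if x = y then x :: pvMerge xs ys           -- take the common digit, advance both
    else if y < x then pvMerge xs (y :: ys)    -- xs[i] > ys[j]: i += 1
    else pvMerge (x :: xs) ys                  -- else: j += 1
  termination_by a b => a.length + b.length
  decreasing_by all_goals simp <;> omega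

def solution_002_alt (X : String) (Y : String) : String :=
  let xs := PySem.List.sorted (X.toList.filter PySem.Chars.isdigit) (fun c => c) true
  let ys := PySem.List.sorted (Y.toList.filter PySem.Chars.isdigit) (fun c => c) true
  let out := pvMerge xs ys
  if out = [] then "-1"
  else if PySem.List.pyGet? out 0 = some '0' then "0"   -- out[0] == '0' (guarded by out ≠ [])
  else String.ofList out

-- ===== PRECONDITION & SPEC =====
def Spec_solution_002 (X : String) (Y : String) (out : String) : Prop := out = solution_002_alt X Y
instance (X : String) (Y : String) (out : String) : Decidable (Spec_solution_002 X Y out) := by unfold Spec_solution_002; infer_instance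

-- ===== CLAIM (what is proved, stated in full; the proofs are below) =====
def Claim_equal_solution_002 : Prop := ∀ (X : String) (Y : String), Dom_solution_002 X Y → Spec_solution_002 X Y (solution_002 X Y)

-- ===== LEMMAS AND PROOFS =====

-- Chars.count with a single-character needle is List.count
lemma pv_count_go_singleton (c : Char) : ∀ (l : List Char) (fuel acc : Nat), l.length ≤ fuel →
    PySem.Chars.count.go [c] fuel l acc = acc + l.count c := by
  intro l
  induction l with
  | nil => intro fuel acc h; cases fuel <;> simp [PySem.Chars.count.go]
  | cons x t ih =>
    intro fuel acc h
    cases fuel with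
    | zero => simp at h
    | succ f =>
      rw [PySem.Chars.count.go]
      have ht : t.length ≤ f := by simpa using h
      by_cases hx : x = c
      · subst hx
        simp [List.isPrefixOf, ih f (acc + 1) ht]
        omega
      · simp [List.isPrefixOf, hx, ih f acc ht, Ne.symm hx]

lemma pv_count_singleton (s : List Char) (c : Char) :
    PySem.Chars.count s [c] = s.count c := by
  simp [PySem.Chars.count, pv_count_go_singleton c s s.length 0 le_rfl]

def pvDigit (k : Nat) : Char := Char.ofNat (48 + k)

lemma pv_toNat_digit (k : Nat) (h : k < 10) : (pvDigit k).toNat = 48 + k := by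
  rw [pvDigit, Char.toNat_ofNat, if_pos]
  exact Or.inl (by omega)

lemma pv_eq_digit_iff (ch : Char) (k : Nat) (h : k < 10) :
    ch = pvDigit k ↔ ch.toNat = 48 + k := by
  constructor
  · rintro rfl; exact pv_toNat_digit k h
  · intro hn
    apply Char.ext
    apply UInt32.toNat_inj.mp
    show ch.toNat = (pvDigit k).toNat
    rw [pv_toNat_digit k h, hn]

-- the canonical descending digit list: one block per digit of ds
def pvCanonF (ds : List Char) (f : Char → Nat) : List Char :=
  ds.flatMap (fun c => List.replicate (f c) c)

def pvDigits : List Char := ['9','8','7','6','5','4','3','2','1','0']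

lemma pv_mem_canon {u : Char} {ds : List Char} {f : Char → Nat}
    (h : u ∈ pvCanonF ds f) : ∃ d ∈ ds, u = d := by
  rw [pvCanonF, List.mem_flatMap] at h
  obtain ⟨d, hd, hu⟩ := h
  exact ⟨d, hd, (List.eq_of_mem_replicate hu)⟩

lemma pvCanonF_nil (f : Char → Nat) : pvCanonF [] f = [] := rfl

lemma pvCanonF_cons (c : Char) (t : List Char) (f : Char → Nat) :
    pvCanonF (c :: t) f = List.replicate (f c) c ++ pvCanonF t f := by
  simp [pvCanonF]

lemma pv_canon_pairwise (ds : List Char) (f : Char → Nat)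
    (hd : ds.Pairwise (fun a b => b < a)) :
    (pvCanonF ds f).Pairwise (fun a b : Char => b ≤ a) := by
  induction ds with
  | nil => simp [pvCanonF]
  | cons c t ih =>
    rw [List.pairwise_cons] at hd
    rw [pvCanonF_cons, List.pairwise_append]
    refine ⟨?_, ih hd.2, ?_⟩
    · rw [List.pairwise_replicate]; right; exact le_rfl
    · intro a ha b hb
      have ha' : a = c := List.eq_of_mem_replicate ha
      obtain ⟨d, hdt, rfl⟩ := pv_mem_canon hb
      rw [ha']
      exact le_of_lt (hd.1 _ hdt)

lemma pv_count_canon (ds : List Char) (f : Char → Nat) (hnd : ds.Nodup) (a : Char) :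
    (pvCanonF ds f).count a = if a ∈ ds then f a else 0 := by
  induction ds with
  | nil => simp [pvCanonF]
  | cons c t ih =>
    rw [List.nodup_cons] at hnd
    rw [pvCanonF_cons, List.count_append, List.count_replicate, ih hnd.2]
    by_cases hac : a = c
    · subst hac
      simp [hnd.1]
    · simp [Ne.symm hac, hac, List.mem_cons]

lemma pv_key_le {a b : Char} (h : b ≤ a) : -((a.toNat : Int)) ≤ -((b.toNat : Int)) := by
  have hn : b.toNat ≤ a.toNat := by
    simpa [Char.le_def, UInt32.le_iff_toNat_le] using h
  omega

lemma pv_isdigit_mem (a : Char) : a ∈ pvDigits ↔ PySem.Chars.isdigit a = true := by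
  constructor
  · intro h; fin_cases h <;> decide
  · intro h
    have h' : '0' ≤ a ∧ a ≤ '9' := by simpa [PySem.Chars.isdigit] using h
    have h1 : '0'.toNat ≤ a.toNat := by
      simpa [Char.le_def, UInt32.le_iff_toNat_le] using h'.1
    have h2 : a.toNat ≤ '9'.toNat := by
      simpa [Char.le_def, UInt32.le_iff_toNat_le] using h'.2
    have e0 : '0'.toNat = 48 := by decide
    have e9 : '9'.toNat = 57 := by decide
    have hb : 48 ≤ a.toNat ∧ a.toNat ≤ 57 := by omega
    obtain ⟨k, hk, hak⟩ : ∃ k, k < 10 ∧ a.toNat = 48 + k := ⟨a.toNat - 48, by omega, by omega⟩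
    have ha : a = pvDigit k := (pv_eq_digit_iff a k hk).mpr hak
    subst ha
    interval_cases k <;> decide

-- sorting the digits of l descending yields the canonical block form
lemma pv_sorted_canon (l : List Char) :
    PySem.List.sorted (l.filter PySem.Chars.isdigit) (fun c => c) true
      = pvCanonF pvDigits (fun c => l.count c) := by
  apply PySem.List.eq_of_perm_of_pairwise_le_of_injective
    (key := fun c : Char => -((c.toNat : Int)))
  · intro a b hab
    simp only [neg_inj, Nat.cast_inj] at hab
    exact Char.ext (UInt32.toNat_inj.mp hab)
  · refine (PySem.List.sorted_perm _ _ _).trans ?_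
    rw [List.perm_iff_count]
    intro a
    rw [pv_count_canon _ _ (by decide)]
    by_cases hdig : PySem.Chars.isdigit a = true
    · rw [List.count_filter hdig, if_pos ((pv_isdigit_mem a).mpr hdig)]
    · rw [if_neg (fun hm => hdig ((pv_isdigit_mem a).mp hm))]
      refine List.count_eq_zero.mpr (fun hm => hdig ?_)
      exact (List.mem_filter.mp hm).2
  · have hp := PySem.List.sorted_pairwise_rev (l.filter PySem.Chars.isdigit)
      (fun c : Char => c)
    exact hp.imp (fun h => pv_key_le h)
  · have hp := pv_canon_pairwise pvDigits (fun c => l.count c) (by decide)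
    exact hp.imp (fun h => pv_key_le h)

lemma pv_merge_nil_right (xs : List Char) : pvMerge xs [] = [] := by
  cases xs <;> simp [pvMerge]

lemma pv_merge_drop_right (c : Char) (ys : List Char) :
    ∀ (b : Nat) (xs : List Char), (∀ u ∈ xs, u < c) →
    pvMerge xs (List.replicate b c ++ ys) = pvMerge xs ys := by
  intro b
  induction b with
  | zero => intro xs _; simp
  | succ n ih =>
    intro xs hx
    cases xs with
    | nil => simp [pvMerge]
    | cons x t =>
      have hxc : x < c := hx x (by simp)
      rw [List.replicate_succ, List.cons_append, pvMerge,
          if_neg (ne_of_lt hxc), if_neg (by exact fun hlt => absurd hxc (not_lt.mpr hlt.le))]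
      exact ih (x :: t) hx

lemma pv_merge_drop_left (c : Char) (xs : List Char) :
    ∀ (b : Nat) (ys : List Char), (∀ u ∈ ys, u < c) →
    pvMerge (List.replicate b c ++ xs) ys = pvMerge xs ys := by
  intro b
  induction b with
  | zero => intro ys _; simp
  | succ n ih =>
    intro ys hy
    cases ys with
    | nil => rw [pv_merge_nil_right, pv_merge_nil_right]
    | cons y u =>
      have hyc : y < c := hy y (by simp)
      rw [List.replicate_succ, List.cons_append, pvMerge,
          if_neg (Ne.symm (ne_of_lt hyc)), if_pos hyc]
      exact ih (y :: u) hy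

lemma pv_merge_block (c : Char) :
    ∀ (a b : Nat) (xs ys : List Char), (∀ u ∈ xs, u < c) → (∀ u ∈ ys, u < c) →
    pvMerge (List.replicate a c ++ xs) (List.replicate b c ++ ys)
      = List.replicate (min a b) c ++ pvMerge xs ys := by
  intro a
  induction a with
  | zero =>
    intro b xs ys hx hy
    simp [pv_merge_drop_right c ys b xs hx]
  | succ n ih =>
    intro b xs ys hx hy
    cases b with
    | zero =>
      simp [pv_merge_drop_left c xs (n + 1) ys hy]
    | succ m =>
      rw [List.replicate_succ, List.replicate_succ, List.cons_append, List.cons_append,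
          pvMerge, if_pos rfl, ih m xs ys hx hy, Nat.succ_min_succ, List.replicate_succ,
          List.cons_append]

lemma pv_merge_canon : ∀ (ds : List Char), ds.Pairwise (fun a b => b < a) →
    ∀ (f g : Char → Nat),
    pvMerge (pvCanonF ds f) (pvCanonF ds g) = pvCanonF ds (fun c => min (f c) (g c)) := by
  intro ds
  induction ds with
  | nil => intro _ f g; simp [pvCanonF, pvMerge]
  | cons c t ih =>
    intro hd f g
    rw [List.pairwise_cons] at hd
    have hmem : ∀ (h : Char → Nat) (u : Char), u ∈ pvCanonF t h → u < c := by
      intro h u hu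
      obtain ⟨d, hdt, rfl⟩ := pv_mem_canon hu
      exact hd.1 _ hdt
    rw [pvCanonF_cons, pvCanonF_cons, pvCanonF_cons,
        pv_merge_block c (f c) (g c) _ _ (hmem f) (hmem g), ih hd.2 f g]

lemma pv_headD_rep (n : Nat) (c d : Char) (l : List Char) :
    (List.replicate n c ++ l).headD d = if n = 0 then l.headD d else c := by
  cases n <;> simp [List.replicate_succ]

lemma pv_headD_rep' (n : Nat) (c d : Char) :
    (List.replicate n c).headD d = if n = 0 then d else c := by
  cases n <;> simp [List.replicate_succ]

lemma pv_flatten_replicate_singleton (n : Nat) (c : Char) :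
    (List.replicate n [c]).flatten = List.replicate n c := by
  induction n with
  | zero => rfl
  | succ k ih => simp [List.replicate_succ, ih]

lemma pv_pyGet?_cons_zero (c : Char) (t : List Char) :
    PySem.List.pyGet? (c :: t) 0 = some c := by
  simp [PySem.List.pyGet?, PySem.List.pyIdx?]

-- the common tail: A tests 'all zeros' by length = count('0'), B by the first (largest) digit
lemma pv_final (L : List Char) (n0 S : Nat)
    (hlen : L.length = S + n0) (hcnt : L.count '0' = n0)
    (hhead : L ≠ [] → (PySem.List.pyGet? L 0 = some '0' ↔ S = 0)) :
    (if L = [] then "-1" else if L.length = List.count '0' L then "0"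
      else String.ofList L)
    = (if L = [] then "-1" else if PySem.List.pyGet? L 0 = some '0' then "0"
      else String.ofList L) := by
  by_cases hnil : L = []
  · rw [if_pos hnil, if_pos hnil]
  · rw [if_neg hnil, if_neg hnil]
    by_cases hS : S = 0
    · rw [if_pos (by omega), if_pos ((hhead hnil).mpr hS)]
    · rw [if_neg (by omega), if_neg (fun h => hS ((hhead hnil).mp h))]

-- ===== VERDICT (by name: the statement is the Claim_ definition above) =====
theorem solution_002_spec : Claim_equal_solution_002 := by
  intro X Y _
  unfold Spec_solution_002
  have hR : PySem.List.pyRange 9 (-1) (-1) = [9,8,7,6,5,4,3,2,1,0] := by decide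
  simp only [solution_002, solution_002_alt, hR,
    pv_sorted_canon X.toList, pv_sorted_canon Y.toList]
  rw [pv_merge_canon pvDigits (by decide) _ _]
  simp only [PySem.List.foldl_append_eq_flatMap, List.nil_append,
    pvDigits, pvCanonF_cons, pvCanonF_nil, List.flatMap_cons, List.flatMap_nil,
    List.append_nil, pv_count_singleton,
    show PySem.Int.toChars 0 = ['0'] from by decide,
    show PySem.Int.toChars 1 = ['1'] from by decide,
    show PySem.Int.toChars 2 = ['2'] from by decide,
    show PySem.Int.toChars 3 = ['3'] from by decide,
    show PySem.Int.toChars 4 = ['4'] from by decide,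
    show PySem.Int.toChars 5 = ['5'] from by decide,
    show PySem.Int.toChars 6 = ['6'] from by decide,
    show PySem.Int.toChars 7 = ['7'] from by decide,
    show PySem.Int.toChars 8 = ['8'] from by decide,
    show PySem.Int.toChars 9 = ['9'] from by decide,
    pv_flatten_replicate_singleton]
  generalize min (List.count '9' X.toList) (List.count '9' Y.toList) = n9
  generalize min (List.count '8' X.toList) (List.count '8' Y.toList) = n8
  generalize min (List.count '7' X.toList) (List.count '7' Y.toList) = n7
  generalize min (List.count '6' X.toList) (List.count '6' Y.toList) = n6
  generalize min (List.count '5' X.toList) (List.count '5' Y.toList) = n5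
  generalize min (List.count '4' X.toList) (List.count '4' Y.toList) = n4
  generalize min (List.count '3' X.toList) (List.count '3' Y.toList) = n3
  generalize min (List.count '2' X.toList) (List.count '2' Y.toList) = n2
  generalize min (List.count '1' X.toList) (List.count '1' Y.toList) = n1
  generalize min (List.count '0' X.toList) (List.count '0' Y.toList) = n0
  refine pv_final _ n0 (n9 + n8 + n7 + n6 + n5 + n4 + n3 + n2 + n1) ?_ ?_ ?_
  · simp only [List.length_append, List.length_replicate]
    omega
  · simp [List.count_append, List.count_replicate]
  · intro hne
    obtain ⟨c, t, hct⟩ := List.exists_cons_of_ne_nil hne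
    have hh : (List.replicate n9 '9' ++ (List.replicate n8 '8' ++ (List.replicate n7 '7' ++
        (List.replicate n6 '6' ++ (List.replicate n5 '5' ++ (List.replicate n4 '4' ++
        (List.replicate n3 '3' ++ (List.replicate n2 '2' ++ (List.replicate n1 '1' ++
        List.replicate n0 '0'))))))))).headD ' ' = c := by
      rw [hct]; rfl
    rw [hct, pv_pyGet?_cons_zero, Option.some_inj]
    simp only [pv_headD_rep, pv_headD_rep'] at hh
    split_ifs at hh with h9 h8 h7 h6 h5 h4 h3 h2 h1 h0
    · exact absurd (by rw [h9, h8, h7, h6, h5, h4, h3, h2, h1, h0]; simp) hne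
    · subst hh; simp; omega
    · subst hh; simp; omega
    · subst hh; simp; omega
    · subst hh; simp; omega
    · subst hh; simp; omega
    · subst hh; simp; omega
    · subst hh; simp; omega
    · subst hh; simp; omega
    · subst hh; simp; omega
    · subst hh; simp; omega
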